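-- pv_equiv track=rewrite | github.com/ryanlyang/Waterbird_Runs | GALS/RedMeat_Runs/run_gals_sweep_redmeat_optimnum.py | upsert_override
-- ===== SOURCE A (Python) =====
-- def upsert_override(overrides, key, value):
--     key_eq = f"{key}="
--     new_override = f"{key}={value}"
--     out = []
--     replaced = False
--     for ov in (overrides or []):
--         if ov.startswith(key_eq):
--             if not replaced:
--                 out.append(new_override)
--                 replaced = True
--             continue
--         out.append(ov)
--     if not replaced:
--         out.append(new_override)
--     return out
-- ===== SOURCE B (Python) =====
-- def upsert_override(overrides, key, value):
--     ovs = overrides or []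
--     prefix = f"{key}="
--     idx = next((i for i, ov in enumerate(ovs) if ov.startswith(prefix)), None)
--     kept = [ov for ov in ovs if not ov.startswith(prefix)]
--     if idx is None:
--         kept.append(f"{key}={value}")
--     else:
--         kept.insert(idx, f"{key}={value}")
--     return kept
-- ===== Notes on version B (the rewrite author's own statement) =====
-- stated objective: simpler
-- what changed: A's single accumulator loop carrying an output list and a 'replaced' flag is replaced by a find-first-index + filter decomposition: locate the first 'key='-prefixed entry, drop all matching entries, then insert the new 'key=value' at that index (or append if none).
import Mathlib
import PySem

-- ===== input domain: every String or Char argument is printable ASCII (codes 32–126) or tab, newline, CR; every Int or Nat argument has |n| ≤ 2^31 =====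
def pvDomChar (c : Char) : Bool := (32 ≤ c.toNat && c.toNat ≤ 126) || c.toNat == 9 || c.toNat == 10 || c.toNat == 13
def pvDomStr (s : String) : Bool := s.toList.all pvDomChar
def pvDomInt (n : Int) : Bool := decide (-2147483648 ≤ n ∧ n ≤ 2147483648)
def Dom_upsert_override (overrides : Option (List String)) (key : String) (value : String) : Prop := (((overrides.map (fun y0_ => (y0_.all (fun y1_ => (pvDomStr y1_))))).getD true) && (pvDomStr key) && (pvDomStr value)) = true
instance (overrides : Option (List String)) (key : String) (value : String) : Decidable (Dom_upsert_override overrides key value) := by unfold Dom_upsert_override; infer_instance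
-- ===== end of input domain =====

-- ===== PORT A =====
-- B replaces A's single accumulator loop (out, replaced flag) by a find-index +
-- filter decomposition; objective: simpler. Return values proved equal on all inputs.
-- pvStep is A's loop body: state = (out, replaced), one override at a time.
def pvStep (p : String → Bool) (new : String) (acc : List String × Bool) (ov : String) :
    List String × Bool :=
  if p ov then
    if !acc.2 then (acc.1 ++ [new], true) else (acc.1, true)
  else (acc.1 ++ [ov], acc.2)

def upsert_override (overrides : Option (List String)) (key : String) (value : String) : List String :=
  let key_eq := key ++ "="
  let new_override := key ++ "=" ++ value
  -- 'overrides or []' : None and the empty list both give []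
  let r := (overrides.getD []).foldl
    (pvStep (fun ov => PySem.Str.startswith ov key_eq) new_override) ([], false)
  if !r.2 then r.1 ++ [new_override] else r.1

-- ===== PORT B =====
def upsert_override_alt (overrides : Option (List String)) (key : String) (value : String) : List String :=
  let ovs := overrides.getD []
  let pfx := key ++ "="
  let idx := ovs.findIdx? (fun ov => PySem.Str.startswith ov pfx)
  let kept := ovs.filter (fun ov => !PySem.Str.startswith ov pfx)
  match idx with
  | none => kept ++ [key ++ "=" ++ value]
  | some i => PySem.List.insert kept (i : Int) (key ++ "=" ++ value)

-- ===== PRECONDITION & SPEC =====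
def Spec_upsert_override (overrides : Option (List String)) (key : String) (value : String) (out : List String) : Prop := out = upsert_override_alt overrides key value
instance (overrides : Option (List String)) (key : String) (value : String) (out : List String) : Decidable (Spec_upsert_override overrides key value out) := by unfold Spec_upsert_override; infer_instance

-- ===== CLAIM (what is proved, stated in full; the proofs are below) =====
def Claim_equal_upsert_override : Prop := ∀ (overrides : Option (List String)) (key : String) (value : String), Dom_upsert_override overrides key value → Spec_upsert_override overrides key value (upsert_override overrides key value)

-- ===== LEMMAS AND PROOFS =====

-- Common recursive characterisation of both ports' result on the list of overrides,
-- for a fixed predicate p (startswith "key=") and replacement string new.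
def pvCore (p : String → Bool) (new : String) : List String → List String
  | [] => [new]
  | x :: xs => if p x then new :: xs.filter (fun y => !p y) else x :: pvCore p new xs

-- A's loop once the flag is true just filters the rest.
theorem pvA_foldl_true (p : String → Bool) (new : String) :
    ∀ (xs : List String) (out : List String),
      xs.foldl (pvStep p new) (out, true) = (out ++ xs.filter (fun y => !p y), true) := by
  intro xs
  induction xs with
  | nil => intro out; simp
  | cons x xs ih =>
      intro out
      by_cases h : p x = true
      · have hstep : pvStep p new (out, true) x = (out, true) := by simp [pvStep, h]
        rw [List.foldl_cons, hstep, ih, List.filter_cons]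
        simp [h]
      · simp only [Bool.not_eq_true] at h
        have hstep : pvStep p new (out, true) x = (out ++ [x], true) := by simp [pvStep, h]
        rw [List.foldl_cons, hstep, ih, List.filter_cons]
        simp [h]

-- A's whole computation from a flag-false accumulator equals out ++ pvCore.
theorem pvA_eq_core (p : String → Bool) (new : String) :
    ∀ (xs : List String) (out : List String),
      (let r := xs.foldl (pvStep p new) (out, false)
       if !r.2 then r.1 ++ [new] else r.1) = out ++ pvCore p new xs := by
  intro xs
  induction xs with
  | nil => intro out; simp [pvCore]
  | cons x xs ih =>
      intro out
      by_cases h : p x = true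
      · have hstep : pvStep p new (out, false) x = (out ++ [new], true) := by simp [pvStep, h]
        rw [List.foldl_cons, hstep]
        rw [pvA_foldl_true p new xs (out ++ [new])]
        simp [pvCore, h]
      · simp only [Bool.not_eq_true] at h
        have hstep : pvStep p new (out, false) x = (out ++ [x], false) := by simp [pvStep, h]
        rw [List.foldl_cons, hstep]
        simpa [pvCore, h] using ih (out ++ [x])

-- The first-match index never exceeds the number of non-matching elements.
theorem pvFindIdx_le_filter_length (p : String → Bool) :
    ∀ (xs : List String) (i : Nat), xs.findIdx? p = some i →
      i ≤ (xs.filter (fun y => !p y)).length := by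
  intro xs
  induction xs with
  | nil => intro i h; simp [List.findIdx?, List.findIdx?.go] at h
  | cons x xs ih =>
      intro i h
      rw [List.findIdx?_cons] at h
      by_cases hp : p x = true
      · simp [hp] at h; omega
      · simp only [Bool.not_eq_true] at hp
        simp [hp] at h
        obtain ⟨j, hj, rfl⟩ := h
        have := ih j hj
        simp [List.filter_cons, hp]
        omega

-- B's computation equals pvCore.
theorem pvB_eq_core (p : String → Bool) (new : String) :
    ∀ (xs : List String),
      (match xs.findIdx? p with
       | none => xs.filter (fun y => !p y) ++ [new]
       | some i => PySem.List.insert (xs.filter (fun y => !p y)) (i : Int) new)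
      = pvCore p new xs := by
  intro xs
  induction xs with
  | nil => rfl
  | cons x xs ih =>
      rw [List.findIdx?_cons]
      by_cases hp : p x = true
      · simp [hp, pvCore, PySem.List.insert_zero]
      · simp only [Bool.not_eq_true] at hp
        simp only [hp, Bool.false_eq_true, if_false, List.filter_cons, Bool.not_false, if_true]
        cases hfi : xs.findIdx? p with
        | none => simpa [hfi, pvCore, hp] using ih
        | some i =>
            have hle := pvFindIdx_le_filter_length p xs i hfi
            rw [hfi] at ih
            simp only [Option.map_some, pvCore, hp, Bool.false_eq_true, if_false]
            have : PySem.List.insert (x :: xs.filter (fun y => !p y)) ((i + 1 : Nat) : Int) new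
                 = x :: PySem.List.insert (xs.filter (fun y => !p y)) (i : Int) new := by
              rw [PySem.List.insert_natCast _ _ _ (by simpa using hle),
                  PySem.List.insert_natCast _ _ _ hle]
              simp
            rw [this]
            simpa using ih

-- ===== VERDICT (by name: the statement is the Claim_ definition above) =====
theorem upsert_override_spec : Claim_equal_upsert_override := by
  intro overrides key value _
  unfold Spec_upsert_override upsert_override upsert_override_alt
  rw [pvB_eq_core (fun ov => PySem.Str.startswith ov (key ++ "=")) (key ++ "=" ++ value)
        (overrides.getD [])]
  simpa using
    pvA_eq_core (fun ov => PySem.Str.startswith ov (key ++ "=")) (key ++ "=" ++ value)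
      (overrides.getD []) []
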